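-- pv_equiv track=rewrite | github.com/XuZhang99/dynamo | deploy/observability/dynamo_local_resource_monitor.py | _extract_arg
-- ===== SOURCE A (Python) =====
-- def _extract_arg(cmdline: list[str], flag: str) -> str:
--     """Extract the value after a CLI flag like --model. Also checks --model-path.
--
--     vLLM uses ``--model``, SGLang uses ``--model-path`` for the same thing —
--     the function tries both so the same caller works regardless of backend.
--     """
--     for f in (flag, flag + "-path"):
--         try:
--             idx = cmdline.index(f)
--             if idx + 1 < len(cmdline):
--                 return cmdline[idx + 1]
--         except ValueError:
--             pass
--     return ""
-- ===== SOURCE B (Python) =====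
-- def _extract_arg(cmdline: list[str], flag: str) -> str:
--     """Single pass over cmdline collecting the first value for both keys at once."""
--     path_flag = flag + "-path"
--     found_flag = None
--     found_path = None
--     seen_flag = False
--     seen_path = False
--     for i, tok in enumerate(cmdline):
--         if tok == flag and not seen_flag:
--             seen_flag = True
--             found_flag = cmdline[i + 1] if i + 1 < len(cmdline) else None
--         elif tok == path_flag and not seen_path:
--             seen_path = True
--             found_path = cmdline[i + 1] if i + 1 < len(cmdline) else None
--     if found_flag is not None:
--         return found_flag
--     if found_path is not None:
--         return found_path
--     return ""
-- ===== Notes on version B (the rewrite author's own statement) =====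
-- stated objective: alternative
-- what changed: Replaces A's two sequential list.index scans (one per flag variant) by a single enumerate pass that records the first following token for both the flag and the flag+'-path' variant simultaneously, then applies the flag-over-flag-path priority after the loop.
import Mathlib
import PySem

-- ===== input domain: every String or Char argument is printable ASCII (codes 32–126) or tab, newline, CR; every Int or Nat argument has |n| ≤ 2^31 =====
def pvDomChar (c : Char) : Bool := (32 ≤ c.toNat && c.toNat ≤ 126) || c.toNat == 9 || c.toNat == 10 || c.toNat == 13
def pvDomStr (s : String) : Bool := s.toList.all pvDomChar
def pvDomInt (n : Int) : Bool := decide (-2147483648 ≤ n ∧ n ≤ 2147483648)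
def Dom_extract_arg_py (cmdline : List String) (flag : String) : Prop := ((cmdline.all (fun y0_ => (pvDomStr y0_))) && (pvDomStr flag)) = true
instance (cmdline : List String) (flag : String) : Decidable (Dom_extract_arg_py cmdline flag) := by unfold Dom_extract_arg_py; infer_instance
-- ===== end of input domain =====

-- B replaces A's two sequential list.index scans by one enumerate pass that collects
-- the first following value for both flag variants at once (alternative decomposition, same cost).

-- ===== PORT A =====
-- one iteration of A's `for f in (flag, flag+"-path")` loop body:
-- `some v` = the iteration returned v; `none` = ValueError was caught or idx+1 was out of range (loop continues)
def pvTryFlag (cmdline : List String) (f : String) : Option String :=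
  match PySem.List.index? cmdline f with
  | some idx => if idx + 1 < cmdline.length then PySem.List.pyGet? cmdline ((idx : Int) + 1) else none
  | none => none

def extract_arg_py (cmdline : List String) (flag : String) : String :=
  match pvTryFlag cmdline flag with
  | some v => v
  | none =>
    match pvTryFlag cmdline (flag ++ "-path") with
    | some v => v
    | none => ""

-- ===== PORT B =====
-- loop state: ((found_flag, seen_flag), (found_path, seen_path))
def pvStepB (cmdline : List String) (flag pathFlag : String)
    (s : (Option String × Bool) × (Option String × Bool)) (it : Int × String) :
    (Option String × Bool) × (Option String × Bool) :=
  if it.2 == flag && !s.1.2 then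
    ((if it.1 + 1 < (cmdline.length : Int) then PySem.List.pyGet? cmdline (it.1 + 1) else none, true), s.2)
  else if it.2 == pathFlag && !s.2.2 then
    (s.1, (if it.1 + 1 < (cmdline.length : Int) then PySem.List.pyGet? cmdline (it.1 + 1) else none, true))
  else s

-- the post-loop return chain of B (found_flag first, then found_path, else "")
def pvFinishB (st : (Option String × Bool) × (Option String × Bool)) : String :=
  match st.1.1 with
  | some v => v
  | none =>
    match st.2.1 with
    | some v => v
    | none => ""

def extract_arg_py_alt (cmdline : List String) (flag : String) : String :=
  pvFinishB ((PySem.List.enumerate cmdline 0).foldl (pvStepB cmdline flag (flag ++ "-path"))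
      ((none, false), (none, false)))

-- ===== PRECONDITION & SPEC =====
def Spec_extract_arg_py (cmdline : List String) (flag : String) (out : String) : Prop := out = extract_arg_py_alt cmdline flag
instance (cmdline : List String) (flag : String) (out : String) : Decidable (Spec_extract_arg_py cmdline flag out) := by unfold Spec_extract_arg_py; infer_instance

-- ===== CLAIM (what is proved, stated in full; the proofs are below) =====
def Claim_equal_extract_arg_py : Prop := ∀ (cmdline : List String) (flag : String), Dom_extract_arg_py cmdline flag → Spec_extract_arg_py cmdline flag (extract_arg_py cmdline flag)

-- ===== LEMMAS AND PROOFS =====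

-- single-key step used to analyse one component of B's fold
def pvStep1 (cmdline : List String) (key : String)
    (s : Option String × Bool) (it : Int × String) : Option String × Bool :=
  if it.2 == key && !s.2 then
    (if it.1 + 1 < (cmdline.length : Int) then PySem.List.pyGet? cmdline (it.1 + 1) else none, true)
  else s

-- once seen, the single-key fold no longer changes the state
theorem pvStep1_frozen (cmdline : List String) (key : String) (xs : List String) (s : Int)
    (v : Option String) :
    (PySem.List.enumerate xs s).foldl (pvStep1 cmdline key) (v, true) = (v, true) := by
  induction xs generalizing s with
  | nil => simp [PySem.List.enumerate_nil]
  | cons x xs ih =>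
    rw [PySem.List.enumerate_cons]
    simp only [List.foldl_cons]
    have hstep : pvStep1 cmdline key (v, true) (s, x) = (v, true) := by simp [pvStep1]
    rw [hstep]
    exact ih (s + 1)

-- characterisation of the single-key fold from the fresh state
theorem pvStep1_char (cmdline : List String) (key : String) (xs : List String) (s : Int) :
    (PySem.List.enumerate xs s).foldl (pvStep1 cmdline key) (none, false) =
      (match PySem.List.index? xs key with
       | some j => (if s + (j : Int) + 1 < (cmdline.length : Int) then
              PySem.List.pyGet? cmdline (s + (j : Int) + 1) else none, true)
       | none => (none, false)) := by
  induction xs generalizing s with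
  | nil => simp [PySem.List.enumerate_nil, PySem.List.index?]
  | cons x xs ih =>
    rw [PySem.List.enumerate_cons]
    simp only [List.foldl_cons]
    by_cases hx : x = key
    · subst hx
      have hstep : pvStep1 cmdline x (none, false) (s, x) =
          (if s + 1 < (cmdline.length : Int) then PySem.List.pyGet? cmdline (s + 1) else none,
            true) := by
        simp [pvStep1]
      rw [hstep, pvStep1_frozen, PySem.List.index?_cons_self]
      norm_num
    · have hstep : pvStep1 cmdline key (none, false) (s, x) = (none, false) := by
        simp [pvStep1, hx]
      rw [hstep, ih (s + 1), PySem.List.index?_cons_of_ne xs hx]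
      cases h : PySem.List.index? xs key with
      | none => simp
      | some j =>
        simp only [Option.map_some]
        have harg : s + 1 + (j : Int) + 1 = s + ((j : Int) + 1) + 1 := by ring
        have hcast : ((j + 1 : Nat) : Int) = (j : Int) + 1 := by push_cast; ring
        rw [harg, hcast]

-- the paired fold is the product of the two single-key folds (the keys differ)
theorem pvStepB_pair (cmdline : List String) (flag pathFlag : String)
    (hne : flag ≠ pathFlag) (xs : List String) (s : Int)
    (s1 s2 : Option String × Bool) :
    (PySem.List.enumerate xs s).foldl (pvStepB cmdline flag pathFlag) (s1, s2) =
      ((PySem.List.enumerate xs s).foldl (pvStep1 cmdline flag) s1,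
       (PySem.List.enumerate xs s).foldl (pvStep1 cmdline pathFlag) s2) := by
  induction xs generalizing s s1 s2 with
  | nil => simp [PySem.List.enumerate_nil]
  | cons x xs ih =>
    rw [PySem.List.enumerate_cons]
    simp only [List.foldl_cons]
    rw [← ih]
    congr 1
    by_cases h1 : x = flag
    · subst h1
      have h2 : x ≠ pathFlag := hne
      by_cases hseen : s1.2 = true
      · simp [pvStepB, pvStep1, hseen, h2]
      · simp only [Bool.not_eq_true] at hseen
        simp [pvStepB, pvStep1, hseen, h2]
    · by_cases h2 : x = pathFlag
      · subst h2
        by_cases hseen : s2.2 = true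
        · simp [pvStepB, pvStep1, h1, hseen]
        · simp only [Bool.not_eq_true] at hseen
          simp [pvStepB, pvStep1, h1, hseen]
      · simp [pvStepB, pvStep1, h1, h2]

theorem pv_flag_ne_path (flag : String) : flag ≠ flag ++ "-path" := by
  intro h
  have := congrArg (fun s => s.toList.length) h
  simp [String.toList_append] at this

-- A's per-flag try equals the corresponding component of B's single-key fold
theorem pvTryFlag_eq (cmdline : List String) (key : String) :
    pvTryFlag cmdline key =
      ((PySem.List.enumerate cmdline 0).foldl (pvStep1 cmdline key) (none, false)).1 := by
  rw [pvStep1_char]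
  unfold pvTryFlag
  cases h : PySem.List.index? cmdline key with
  | none => simp
  | some j =>
    simp only [zero_add]
    by_cases hlt : (j : Int) + 1 < (cmdline.length : Int)
    · rw [if_pos hlt, if_pos (by exact_mod_cast hlt)]
    · rw [if_neg hlt, if_neg (by exact_mod_cast hlt)]

-- ===== VERDICT (by name: the statement is the Claim_ definition above) =====
theorem extract_arg_py_spec : Claim_equal_extract_arg_py := by
  intro cmdline flag _
  unfold Spec_extract_arg_py extract_arg_py extract_arg_py_alt
  rw [pvStepB_pair cmdline flag (flag ++ "-path") (pv_flag_ne_path flag)]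
  rw [pvTryFlag_eq cmdline flag, pvTryFlag_eq cmdline (flag ++ "-path")]
  rfl
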